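-- pv_equiv track=rewrite | github.com/huggingface/transformers | src/transformers/models/seggpt/image_processing_seggpt.py | build_palette
-- ===== SOURCE A (Python) =====
-- from typing import Dict, List, Optional, Tuple, Union
--
-- def build_palette(num_labels: int) -> List[Tuple[int, int]]:
--     base = int(num_labels ** (1 / 3)) + 1
--     margin = 256 // base
--
--     # we assume that class_idx 0 is the background which is mapped to black
--     color_list = [(0, 0, 0)]
--     for location in range(num_labels):
--         num_seq_r = location // base**2
--         num_seq_g = (location % base**2) // base
--         num_seq_b = location % base
--
--         R = 255 - num_seq_r * margin
--         G = 255 - num_seq_g * margin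
--         B = 255 - num_seq_b * margin
--
--         color_list.append((R, G, B))
--
--     return color_list
-- ===== SOURCE B (Python) =====
-- def build_palette(num_labels):
--     base = int(num_labels ** (1 / 3)) + 1
--     margin = 256 // base
--     shades = [255 - d * margin for d in range(base)]
--     colors = [(r, g, b) for r in shades for g in shades for b in shades]
--     return [(0, 0, 0)] + colors[:num_labels]
-- ===== Notes on version B (the rewrite author's own statement) =====
-- stated objective: faster
-- what changed: B precomputes the shade list once and enumerates the palette as a triple cartesian-product comprehension truncated by a slice, instead of A's per-index floor-division and modulo digit decomposition inside the loop.
import Mathlib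
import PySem

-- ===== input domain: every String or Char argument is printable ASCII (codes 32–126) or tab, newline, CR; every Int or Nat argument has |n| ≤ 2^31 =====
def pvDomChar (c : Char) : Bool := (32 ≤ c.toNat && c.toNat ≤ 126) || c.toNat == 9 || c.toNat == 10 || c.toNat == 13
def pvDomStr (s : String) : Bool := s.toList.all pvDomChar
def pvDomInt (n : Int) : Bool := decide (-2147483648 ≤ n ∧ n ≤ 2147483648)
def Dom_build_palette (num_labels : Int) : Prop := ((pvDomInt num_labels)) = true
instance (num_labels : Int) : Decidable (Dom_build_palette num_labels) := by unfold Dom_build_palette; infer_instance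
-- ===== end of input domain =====

-- B enumerates the palette as a triple cartesian product of one precomputed shade list,
-- truncated by a slice, instead of A's per-index floor-division/modulo digit decomposition
-- (a timing run is what decides any speed label; same base and margin as A).

-- ===== PORT A =====
-- Hand port of the float expression `int(num_labels ** (1 / 3))` (PySem has no floats).
-- Exact for 0 ≤ n ≤ 2^31 on CPython doubles (checked against Python): it equals the integer
-- cube root of n, except at perfect cubes k^3 with k ≥ 4, where the double rounds just below
-- k and int() truncates to k - 1.  (For n < 0 Python raises TypeError: Pre_ excludes those.)
-- The fuel 2000 only makes the search total; it is never exhausted for n ≤ 2^31.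
def cbrtLoopA (fuel : Nat) (n : Int) (k : Nat) : Nat :=
  match fuel with
  | 0 => k
  | fuel + 1 => if ((k : Int) + 1) ^ 3 ≤ n then cbrtLoopA fuel n (k + 1) else k

def pyCbrtInt (n : Int) : Int :=
  let k : Int := (cbrtLoopA 2000 n 0 : Nat)
  if k ^ 3 = n ∧ 4 ≤ k then k - 1 else k

def build_palette (num_labels : Int) : List (Int × Int × Int) :=
  let base : Int := pyCbrtInt num_labels + 1
  let margin : Int := PySem.Int.floordiv 256 base
  (PySem.List.pyRange 0 num_labels 1).foldl (fun color_list location =>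
      let num_seq_r := PySem.Int.floordiv location (base ^ 2)
      let num_seq_g := PySem.Int.floordiv (PySem.Int.mod location (base ^ 2)) base
      let num_seq_b := PySem.Int.mod location base
      color_list ++ [(255 - num_seq_r * margin, 255 - num_seq_g * margin, 255 - num_seq_b * margin)])
    [(0, 0, 0)]

-- ===== PORT B =====
-- Same first two lines as Source B (base via the shared float-cbrt helper, margin), then the
-- shade list, the cartesian-product comprehension and the truncating slice.
def build_palette_alt (num_labels : Int) : List (Int × Int × Int) :=
  let base : Int := pyCbrtInt num_labels + 1
  let margin : Int := PySem.Int.floordiv 256 base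
  let shades := (PySem.List.pyRange 0 base 1).map (fun d => 255 - d * margin)
  let colors := shades.flatMap (fun r => shades.flatMap (fun g => shades.map (fun b => (r, g, b))))
  [(0, 0, 0)] ++ PySem.List.slice colors none (some num_labels)

-- ===== PRECONDITION & SPEC =====
-- Pre_ excludes num_labels < 0: there both A and B raise TypeError (negative ** (1/3) is complex).
def Pre_build_palette (num_labels : Int) : Prop := 0 ≤ num_labels
instance (num_labels : Int) : Decidable (Pre_build_palette num_labels) := by unfold Pre_build_palette; infer_instance
def pvWitness_build_palette : Int := 5

def Spec_build_palette (num_labels : Int) (out : List (Int × Int × Int)) : Prop := out = build_palette_alt num_labels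
instance (num_labels : Int) (out : List (Int × Int × Int)) : Decidable (Spec_build_palette num_labels out) := by unfold Spec_build_palette; infer_instance

-- ===== CLAIM (what is proved, stated in full; the proofs are below) =====
def Claim_equal_build_palette : Prop := ∀ (num_labels : Int), Dom_build_palette num_labels → Pre_build_palette num_labels → Spec_build_palette num_labels (build_palette num_labels)

-- ===== LEMMAS AND PROOFS =====

lemma cbrtLoopA_spec (fuel : Nat) : ∀ (k : Nat) (n : Int), ((k : Int)) ^ 3 ≤ n → n < ((k : Int) + fuel) ^ 3 →
    (((cbrtLoopA fuel n k : Nat) : Int)) ^ 3 ≤ n ∧ n < (((cbrtLoopA fuel n k : Nat) : Int) + 1) ^ 3 := by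
  induction fuel with
  | zero =>
    intro k n h1 h2
    simp only [Nat.cast_zero, add_zero] at h2
    exact absurd (lt_of_le_of_lt h1 h2) (lt_irrefl _)
  | succ f ih =>
    intro k n h1 h2
    simp only [cbrtLoopA]
    split
    · rename_i h
      refine ih (k + 1) n (by push_cast; exact h) ?_
      have he : ((k + 1 : Nat) : Int) + f = (k : Int) + (f + 1 : Nat) := by push_cast; ring
      rw [he]
      exact h2
    · rename_i h
      exact ⟨h1, by linarith [lt_of_not_ge h]⟩

lemma flatMap_range_map {α : Type} (a b : Nat) (H : Nat → Nat → α) :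
    (List.range a).flatMap (fun q => (List.range b).map (fun s => H q s)) =
      (List.range (a * b)).map (fun i => H (i / b) (i % b)) := by
  rcases Nat.eq_zero_or_pos b with hb | hb
  · subst hb; simp
  induction a with
  | zero => simp
  | succ a ih =>
    rw [List.range_succ, List.flatMap_append, ih, Nat.succ_mul, List.range_add, List.map_append,
      List.map_map]
    congr 1
    · simp only [List.flatMap_cons, List.flatMap_nil, List.append_nil]
      apply List.map_congr_left
      intro s hs
      rw [List.mem_range] at hs
      have h1 : (a * b + s) / b = a := by
        rw [Nat.add_comm, Nat.add_mul_div_right _ _ hb, Nat.div_eq_of_lt hs]; omega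
      have h2 : (a * b + s) % b = s := by
        rw [Nat.add_comm, Nat.add_mul_mod_self_right, Nat.mod_eq_of_lt hs]
      simp [Function.comp, h1, h2]

lemma triple_prod (M : Nat) (G : Nat → Int) :
    (List.range M).flatMap (fun r => (List.range M).flatMap (fun g => (List.range M).map
      (fun b => (G r, G g, G b)))) =
    (List.range (M * (M * M))).map (fun i => (G (i / (M * M)), G (i % (M * M) / M), G (i % (M * M) % M))) := by
  have h1 : ∀ r, (List.range M).flatMap (fun g => (List.range M).map (fun b => ((G r : Int), G g, G b))) =
      (List.range (M * M)).map (fun j => (G r, G (j / M), G (j % M))) :=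
    fun r => flatMap_range_map M M (fun g b => (G r, G g, G b))
  simp only [h1]
  exact flatMap_range_map M (M * M) (fun q j => (G q, G (j / M), G (j % M)))

def pal (M : Nat) (i : Nat) : Int × Int × Int :=
  (255 - ((i / (M * M) : Nat) : Int) * PySem.Int.floordiv 256 (M : Int),
   255 - (((i % (M * M)) / M : Nat) : Int) * PySem.Int.floordiv 256 (M : Int),
   255 - ((i % M : Nat) : Int) * PySem.Int.floordiv 256 (M : Int))

lemma A_norm (n : Int) (M : Nat) (hM : pyCbrtInt n + 1 = (M : Int)) :
    build_palette n = (0, 0, 0) :: (List.range n.toNat).map (pal M) := by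
  simp only [build_palette, hM]
  rw [PySem.List.pyRange_one, List.foldl_map, PySem.List.foldl_append_singleton_eq_map]
  simp only [sub_zero, zero_add, List.singleton_append]
  congr 1
  apply List.map_congr_left
  intro k _
  have e2 : ((M : Int)) ^ 2 = ((M * M : Nat) : Int) := by push_cast; ring
  rw [e2, PySem.Int.floordiv_natCast, PySem.Int.mod_natCast, PySem.Int.floordiv_natCast,
    PySem.Int.mod_natCast, pal]

lemma B_norm (n : Int) (hn : 0 ≤ n) (M : Nat) (hM : pyCbrtInt n + 1 = (M : Int))
    (hle : n.toNat ≤ M * (M * M)) :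
    build_palette_alt n = (0, 0, 0) :: (List.range n.toNat).map (pal M) := by
  simp only [build_palette_alt, hM]
  rw [PySem.List.pyRange_one]
  simp only [sub_zero, Int.toNat_natCast, zero_add, List.flatMap_map, List.map_map,
    Function.comp_def]
  rw [PySem.List.slice_to _ hn,
    triple_prod M (fun d => 255 - (d : Int) * PySem.Int.floordiv 256 (M : Int)),
    ← List.map_take, List.take_range, Nat.min_eq_left hle]
  simp only [List.singleton_append]
  congr 1
  apply List.map_congr_left
  intro i _
  rw [Nat.mod_mod_of_dvd i (dvd_mul_left M M), pal]

-- ===== VERDICT (by name: the statement is the Claim_ definition above) =====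
theorem build_palette_spec : Claim_equal_build_palette := by
  intro n hDom hPre
  have hDom' : -2147483648 ≤ n ∧ n ≤ 2147483648 := by simpa [Dom_build_palette, pvDomInt] using hDom
  obtain ⟨h1, h2⟩ := cbrtLoopA_spec 2000 0 n (by simpa using hPre) (by push_cast; nlinarith [hDom'.2])
  set r : Nat := cbrtLoopA 2000 n 0 with hr
  show build_palette n = build_palette_alt n
  by_cases hc : ((r : Int)) ^ 3 = n ∧ 4 ≤ (r : Int)
  · -- perfect cube with r ≥ 4: base = r, and n = r^3 fits exactly
    have hA : pyCbrtInt n + 1 = ((r : Nat) : Int) := by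
      simp only [pyCbrtInt, ← hr]
      rw [if_pos hc]; ring
    have hle : n.toNat ≤ r * (r * r) := by
      have : n = (((r * (r * r) : Nat)) : Int) := by push_cast; nlinarith [hc.1]
      omega
    rw [A_norm n r hA, B_norm n hPre r hA hle]
  · have hA : pyCbrtInt n + 1 = ((r + 1 : Nat) : Int) := by
      simp only [pyCbrtInt, ← hr]
      rw [if_neg hc]; push_cast; ring
    have hle : n.toNat ≤ (r + 1) * ((r + 1) * (r + 1)) := by
      have hcast : n < (((r + 1) * ((r + 1) * (r + 1)) : Nat) : Int) := by push_cast; nlinarith [h2]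
      omega
    rw [A_norm n (r + 1) hA, B_norm n hPre (r + 1) hA hle]
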